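-- pv_equiv track=rewrite | github.com/soroushzargar/FairReporter | analyzer.py | _articles_by_date
-- ===== SOURCE A (Python) =====
-- from collections import Counter
-- from typing import Any, Dict, List
--
-- def _articles_by_date(articles: List[Dict]) -> Dict[str, int]:
--     """Group articles by date string (YYYY-MM-DD prefix) for timeline data."""
--     counts: Counter = Counter()
--     for art in articles:
--         date = art.get("date", "")
--         if date:
--             day = date[:10]  # take YYYY-MM-DD portion
--             counts[day] += 1
--     return dict(sorted(counts.items()))
-- ===== SOURCE B (Python) =====
-- def _articles_by_date(articles):
--     """Group articles by date string (YYYY-MM-DD prefix) for timeline data."""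
--     days = sorted(art.get("date", "")[:10] for art in articles if art.get("date", ""))
--     result = {}
--     i = 0
--     n = len(days)
--     while i < n:
--         day = days[i]
--         j = i + 1
--         while j < n and days[j] == day:
--             j += 1
--         result[day] = j - i
--         i = j
--     return result
-- ===== Notes on version B (the rewrite author's own statement) =====
-- stated objective: alternative
-- what changed: Replaces Counter-hashing-then-sorting-items with collect-day-keys, sort them, and count consecutive runs in one scan (sort-then-group), building the dict already in key order.
import Mathlib
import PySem

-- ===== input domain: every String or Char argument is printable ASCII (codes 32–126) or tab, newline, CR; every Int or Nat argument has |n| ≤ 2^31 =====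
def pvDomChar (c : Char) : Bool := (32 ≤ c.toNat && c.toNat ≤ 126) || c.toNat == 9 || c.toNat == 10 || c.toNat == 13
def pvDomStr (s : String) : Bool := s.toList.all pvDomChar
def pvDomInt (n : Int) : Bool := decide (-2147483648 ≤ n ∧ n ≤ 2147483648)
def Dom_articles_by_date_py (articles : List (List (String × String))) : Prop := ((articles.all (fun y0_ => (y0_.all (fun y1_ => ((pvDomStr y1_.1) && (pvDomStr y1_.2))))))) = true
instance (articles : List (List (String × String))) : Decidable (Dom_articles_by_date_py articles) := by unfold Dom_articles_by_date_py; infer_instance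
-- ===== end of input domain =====

-- B counts each sorted day-key list by consecutive runs instead of hashing into a Counter and sorting the items; return values agree everywhere.

-- shared extraction helper: art.get("date", "") on the article dict
def pvDate (art : List (String × String)) : String :=
  (PySem.Dict.ofList art).getD "date" ""

-- ===== PORT A =====
def articles_by_date_py (articles : List (List (String × String))) : List (String × Int) :=
  let counts := articles.foldl
    (fun (c : PySem.Dict String Int) art =>
      let date := pvDate art
      if date ≠ "" then c.modify (PySem.Str.slice date none (some 10)) 0 (· + 1) else c)
    PySem.Dict.empty
  PySem.List.sorted2 counts.items (fun p => p.1) (fun p => p.2)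

-- ===== PORT B =====
-- inner while loop of B: count the run of equal leading day keys, then continue after it
def pvGroup : List String → List (String × Int)
  | [] => []
  | d :: rest =>
      (d, ((rest.takeWhile (fun x => x == d)).length : Int) + 1) ::
        pvGroup (rest.dropWhile (fun x => x == d))
termination_by l => l.length
decreasing_by simpa using Nat.lt_succ_of_le (List.length_dropWhile_le _ _)

def articles_by_date_py_alt (articles : List (List (String × String))) : List (String × Int) :=
  let days := PySem.List.sorted
    ((articles.filter (fun art => decide (pvDate art ≠ ""))).map
      (fun art => PySem.Str.slice (pvDate art) none (some 10)))
    (fun x => x)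
  pvGroup days

-- ===== PRECONDITION & SPEC =====
def Spec_articles_by_date_py (articles : List (List (String × String))) (out : List (String × Int)) : Prop := out = articles_by_date_py_alt articles
instance (articles : List (List (String × String))) (out : List (String × Int)) : Decidable (Spec_articles_by_date_py articles out) := by unfold Spec_articles_by_date_py; infer_instance

-- ===== CLAIM (what is proved, stated in full; the proofs are below) =====
def Claim_equal_articles_by_date_py : Prop := ∀ (articles : List (List (String × String))), Dom_articles_by_date_py articles → Spec_articles_by_date_py articles (articles_by_date_py articles)

-- ===== LEMMAS AND PROOFS =====


theorem pv_insertBy_congr {α : Type} (b1 b2 : α → α → Bool) (x : α) :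
    ∀ ys : List α, (∀ y ∈ ys, b1 x y = b2 x y) →
      PySem.List.insertBy b1 x ys = PySem.List.insertBy b2 x ys := by
  intro ys
  induction ys with
  | nil => intro _; rfl
  | cons y ys ih =>
    intro h
    simp only [PySem.List.insertBy]
    rw [h y (by simp)]
    by_cases hb : b2 x y = true
    · simp [hb]
    · simp [hb, ih (fun z hz => h z (by simp [hz]))]

theorem pv_foldl_insertBy_key_congr {α κ : Type} [DecidableEq κ] (K : α → κ)
    (b1 b2 : α → α → Bool) (hb : ∀ x y, K x ≠ K y → b1 x y = b2 x y) :
    ∀ (xs acc : List α), ((acc ++ xs).map K).Nodup →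
      xs.foldl (fun a x => PySem.List.insertBy b1 x a) acc
        = xs.foldl (fun a x => PySem.List.insertBy b2 x a) acc := by
  intro xs
  induction xs with
  | nil => intro acc _; rfl
  | cons x xs ih =>
    intro acc hnd
    rw [List.map_append, List.map_cons] at hnd
    have hKax : ∀ y ∈ acc, K x ≠ K y := by
      intro y hy
      have hd := List.disjoint_of_nodup_append hnd
      intro he
      have hm : K y ∈ K x :: xs.map K := by rw [← he]; exact List.mem_cons_self
      exact hd (List.mem_map_of_mem hy) hm
    have h1 : PySem.List.insertBy b1 x acc = PySem.List.insertBy b2 x acc :=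
      pv_insertBy_congr b1 b2 x acc (fun y hy => hb x y (hKax y hy))
    simp only [List.foldl_cons, h1]
    apply ih
    have hperm : (PySem.List.insertBy b2 x acc ++ xs).Perm (acc ++ x :: xs) :=
      ((PySem.List.insertBy_perm b2 x acc).append_right xs).trans List.perm_middle.symm
    have : ((acc ++ x :: xs).map K).Nodup := by rw [List.map_append, List.map_cons]; exact hnd
    exact ((hperm.map K).nodup_iff).mpr this

theorem pv_sorted2_eq_sorted_fst (xs : List (String × Int))
    (h : (xs.map Prod.fst).Nodup) :
    PySem.List.sorted2 xs (fun p => p.1) (fun p => p.2)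
      = PySem.List.sorted xs (fun p => p.1) := by
  simp only [PySem.List.sorted2, PySem.List.sorted, if_neg (by decide : ¬ (false = true))]
  apply pv_foldl_insertBy_key_congr (K := Prod.fst)
  · intro x y hne
    rcases lt_trichotomy x.1 y.1 with hlt | heq | hgt
    · simp [hlt]
    · exact absurd heq hne
    · simp [not_lt_of_gt hgt, hgt]
  · simpa using h
theorem pv_ofList_sublist {α : Type} [BEq α] [LawfulBEq α] :
    ∀ xs : List α, (PySem.Set.ofList xs).Sublist xs := by
  intro xs
  induction xs with
  | nil => simp [PySem.Set.ofList_nil]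
  | cons x xs ih =>
    rw [PySem.Set.ofList_cons]
    exact List.Sublist.cons₂ x ((List.filter_sublist).trans ih)

theorem pv_filter_ofList_append (d : String) :
    ∀ (run rest : List String), (∀ x ∈ run, x = d) →
      (PySem.Set.ofList (run ++ rest)).filter (fun y => !(y == d))
        = (PySem.Set.ofList rest).filter (fun y => !(y == d)) := by
  intro run
  induction run with
  | nil => intro rest _; rfl
  | cons x run ih =>
    intro rest h
    have hx : x = d := h x (by simp)
    rw [List.cons_append, PySem.Set.ofList_cons]
    rw [List.filter_cons_of_neg (by simp [hx])]
    show ((PySem.Set.ofList (run ++ rest)).filter (fun y => !(y == x))).filter (fun y => !(y == d)) = _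
    rw [hx, List.filter_filter]
    simp only [Bool.and_self]
    exact ih rest (fun z hz => h z (by simp [hz]))

theorem pv_dropWhile_head_false {α : Type} (p : α → Bool) :
    ∀ (l l' : List α) (b : α), l.dropWhile p = b :: l' → p b = false := by
  intro l
  induction l with
  | nil => intro l' b h; simp at h
  | cons x xs ih =>
    intro l' b h
    rw [List.dropWhile_cons] at h
    by_cases hp : p x = true
    · exact ih l' b (by rwa [if_pos hp] at h)
    · rw [if_neg hp] at h
      cases h
      simpa using hp

theorem pvGroup_spec :
    ∀ P : List String, P.Pairwise (· ≤ ·) →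
      pvGroup P = (PySem.Set.ofList P).map (fun k => (k, (P.count k : Int))) := by
  intro P
  induction P using pvGroup.induct with
  | case1 => intro _; simp [pvGroup, PySem.Set.ofList_nil]
  | case2 d rest ih =>
    intro hp
    have hd_le : ∀ x ∈ rest, d ≤ x := (List.pairwise_cons.mp hp).1
    have hrest : rest.Pairwise (· ≤ ·) := (List.pairwise_cons.mp hp).2
    set run := rest.takeWhile (fun x => x == d) with hrun_def
    set rest' := rest.dropWhile (fun x => x == d) with hrest'_def
    have hsplit : run ++ rest' = rest := List.takeWhile_append_dropWhile
    have hrun : ∀ x ∈ run, x = d := by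
      intro x hx
      exact eq_of_beq (List.mem_takeWhile_imp (p := fun x => x == d) hx)
    have hrest'p : rest'.Pairwise (· ≤ ·) := hrest.sublist (List.dropWhile_sublist _)
    have hdnot : d ∉ rest' := by
      intro hmem
      cases hr : rest' with
      | nil => rw [hr] at hmem; simp at hmem
      | cons h0 t =>
        have hh0d : h0 ≠ d := by
          have := pv_dropWhile_head_false (fun x => x == d) rest t h0 (hrest'_def ▸ hr)
          simpa using this
        have hh0mem : h0 ∈ rest := (List.dropWhile_sublist _).mem (by rw [← hrest'_def, hr]; simp)
        have hdh0 : d < h0 := lt_of_le_of_ne (hd_le h0 hh0mem) (Ne.symm hh0d)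
        rw [hr] at hmem
        rcases List.mem_cons.mp hmem with he | ht
        · exact hh0d he.symm
        · have := (List.pairwise_cons.mp (hr ▸ hrest'p)).1 d ht
          exact absurd (lt_of_lt_of_le hdh0 this) (lt_irrefl d)
    have hcount_run : run.count d = run.length := List.count_eq_length.mpr (fun b hb => (hrun b hb).symm)
    have hcount_d : (d :: rest).count d = run.length + 1 := by
      rw [List.count_cons_self, ← hsplit, List.count_append, hcount_run,
        List.count_eq_zero.mpr hdnot]
    have hofList : PySem.Set.ofList (d :: rest) = d :: PySem.Set.ofList rest' := by
      rw [PySem.Set.ofList_cons]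
      show _ = d :: PySem.Set.ofList rest'
      congr 1
      show (PySem.Set.ofList rest).filter (fun y => !(y == d)) = _
      rw [← hsplit, pv_filter_ofList_append d run rest' hrun]
      apply List.filter_eq_self.mpr
      intro a ha
      have : a ∈ rest' := by simpa using (PySem.Set.mem_ofList rest' a).mp ha
      simp only [ne_eq, Bool.not_eq_eq_eq_not, Bool.not_true, beq_eq_false_iff_ne]
      intro he; exact hdnot (he ▸ this)
    rw [pvGroup, hofList, List.map_cons, ih hrest'p]
    congr 1
    · rw [hcount_d]; push_cast; rfl
    · apply List.map_congr_left
      intro k hk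
      have hk' : k ∈ rest' := by simpa using (PySem.Set.mem_ofList rest' k).mp hk
      have hkd : k ≠ d := fun he => hdnot (he ▸ hk')
      have hc : List.count k (d :: (run ++ rest')) = List.count k rest' := by
        simp [List.count_append, Ne.symm hkd,
          List.count_eq_zero.mpr (fun hm => hkd (hrun k hm))]
      rw [← hsplit, hc]

theorem pv_main (articles : List (List (String × String))) :
    articles_by_date_py articles = articles_by_date_py_alt articles := by
  show PySem.List.sorted2
      (articles.foldl
        (fun (c : PySem.Dict String Int) art =>
          let date := pvDate art
          if date ≠ "" then c.modify (PySem.Str.slice date none (some 10)) 0 (· + 1) else c)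
        PySem.Dict.empty).items (fun p => p.1) (fun p => p.2)
    = pvGroup (PySem.List.sorted
        ((articles.filter (fun art => decide (pvDate art ≠ ""))).map
          (fun art => PySem.Str.slice (pvDate art) none (some 10)))
        (fun x => x))
  set g : List (String × String) → String :=
    fun art => PySem.Str.slice (pvDate art) none (some 10) with hg
  set L : List String :=
    (articles.filter (fun art => decide (pvDate art ≠ ""))).map g with hL
  set S : List String := PySem.List.sorted L (fun x => x) with hS
  have hfold : articles.foldl
      (fun (c : PySem.Dict String Int) art =>
        let date := pvDate art
        if date ≠ "" then c.modify (PySem.Str.slice date none (some 10)) 0 (· + 1) else c)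
      PySem.Dict.empty = PySem.Dict.counter L := by
    show articles.foldl
      (fun (c : PySem.Dict String Int) art =>
        if pvDate art ≠ "" then c.modify (g art) 0 (· + 1) else c)
      PySem.Dict.empty = _
    rw [PySem.List.foldl_ite_eq_foldl_filter (p := fun art => pvDate art ≠ "")
      (f := fun (c : PySem.Dict String Int) art => c.modify (g art) 0 (· + 1))]
    rw [hL, PySem.Dict.counter_eq_foldl, List.foldl_map]
  rw [hfold, PySem.Dict.items_counter]
  have hnodup : ((((PySem.Set.ofList L).map (fun k => (k, (L.count k : Int))))).map Prod.fst).Nodup := by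
    simp only [List.map_map]
    have : (Prod.fst ∘ fun k => ((k, (L.count k : Int)) : String × Int)) = id := rfl
    rw [this, List.map_id]
    exact PySem.Set.nodup_ofList L
  rw [pv_sorted2_eq_sorted_fst _ hnodup]
  have hSpair : S.Pairwise (· ≤ ·) := PySem.List.sorted_pairwise L (fun x => x)
  rw [pvGroup_spec S hSpair]
  apply PySem.List.sorted_eq_of_perm_of_pairwise_lt
  · have hcnt : (fun k => ((k, (S.count k : Int)) : String × Int))
        = fun k => (k, (L.count k : Int)) := by
      funext k
      rw [(PySem.List.sorted_perm L (fun x => x) false).count_eq]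
    rw [hcnt]
    refine List.Perm.map _ ?_
    rw [List.perm_ext_iff_of_nodup (PySem.Set.nodup_ofList S) (PySem.Set.nodup_ofList L)]
    intro a
    rw [PySem.Set.mem_ofList, PySem.Set.mem_ofList, hS, PySem.List.mem_sorted]
  · have h1 : (PySem.Set.ofList S).Pairwise (· ≤ ·) :=
      hSpair.sublist (pv_ofList_sublist S)
    have h2 : (PySem.Set.ofList S).Pairwise (· ≠ ·) := PySem.Set.nodup_ofList S
    have h3 : (PySem.Set.ofList S).Pairwise (· < ·) :=
      (h1.and h2).imp (fun h => lt_of_le_of_ne h.1 h.2)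
    rw [List.pairwise_map]
    exact h3

-- ===== VERDICT (by name: the statement is the Claim_ definition above) =====
theorem articles_by_date_py_spec : Claim_equal_articles_by_date_py := by
  intro articles _
  exact pv_main articles
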